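-- pv_equiv track=rewrite | github.com/miguel-faria/deep_rl | legibility/src/dl_envs/pursuit/pursuit_env.py | aggregate_obs
-- ===== SOURCE A (Python) =====
-- from typing import Tuple, List, Dict, Any, TypeVar, Union, Optional
--
-- def aggregate_obs(hunter_obs: List, prey_obs: List) -> List:
-- 	final_obs = []
-- 	for idx in range(len(hunter_obs)):
-- 		ordered_hunter_obs = hunter_obs[idx].copy()
-- 		for elem in hunter_obs[:idx]:
-- 			ordered_hunter_obs += elem.copy()
-- 		for elem in hunter_obs[idx + 1:]:
-- 			ordered_hunter_obs += elem.copy()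
-- 		final_obs += [ordered_hunter_obs + prey_obs]
-- 	return final_obs
-- ===== SOURCE B (Python) =====
-- def aggregate_obs(hunter_obs, prey_obs):
--     prefixes = [[]]
--     for h in hunter_obs:
--         prefixes.append(prefixes[-1] + h)
--     tails = [[]]
--     for h in reversed(hunter_obs):
--         tails.append(h + tails[-1])
--     tails.reverse()
--     return [h + prefixes[i] + tails[i + 1] + prey_obs
--             for i, h in enumerate(hunter_obs)]
-- ===== Notes on version B (the rewrite author's own statement) =====
-- stated objective: alternative
-- what changed: Instead of rescanning hunter_obs[:idx] and hunter_obs[idx+1:] with element-wise .copy() for every index, B precomputes flattened prefix and suffix tables in two linear sweeps and assembles each row as hunter+prefix[i]+suffix[i+1]+prey in one final pass.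
import Mathlib
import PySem

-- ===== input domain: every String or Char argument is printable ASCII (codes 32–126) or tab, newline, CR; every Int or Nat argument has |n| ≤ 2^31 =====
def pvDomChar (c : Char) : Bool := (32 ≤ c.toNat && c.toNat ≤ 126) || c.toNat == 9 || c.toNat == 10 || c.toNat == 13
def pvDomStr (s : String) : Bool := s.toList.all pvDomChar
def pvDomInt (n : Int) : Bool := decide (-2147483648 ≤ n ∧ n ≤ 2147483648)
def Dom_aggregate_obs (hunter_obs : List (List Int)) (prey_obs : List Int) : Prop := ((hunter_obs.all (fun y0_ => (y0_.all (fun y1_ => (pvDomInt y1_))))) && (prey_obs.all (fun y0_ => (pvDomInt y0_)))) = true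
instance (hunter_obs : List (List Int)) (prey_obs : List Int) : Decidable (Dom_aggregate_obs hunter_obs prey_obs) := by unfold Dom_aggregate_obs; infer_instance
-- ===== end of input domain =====

-- B builds flattened prefix/suffix tables in two linear sweeps instead of rescanning
-- hunter_obs[:idx] and hunter_obs[idx+1:] for every index (objective: alternative decomposition).

-- ===== PORT A =====
def aggregate_obs (hunter_obs : List (List Int)) (prey_obs : List Int) : List (List Int) :=
  (PySem.List.pyRange 0 hunter_obs.length 1).foldl (fun final_obs idx =>
    let ordered1 := PySem.List.pyGetD hunter_obs idx []          -- hunter_obs[idx].copy()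
    let ordered2 := (PySem.List.slice hunter_obs none (some idx)).foldl (fun o e => o ++ e) ordered1
    let ordered3 := (PySem.List.slice hunter_obs (some (idx + 1)) none).foldl (fun o e => o ++ e) ordered2
    final_obs ++ [ordered3 ++ prey_obs]) []

-- ===== PORT B =====
-- prefixes: prefixes[i] = flatten(hunter_obs[:i]), built left to right off the last entry
def pvPrefixes (hs : List (List Int)) : List (List Int) :=
  hs.foldl (fun acc h => acc ++ [acc.getLastD [] ++ h]) [[]]

-- tails: tails[i] = flatten(hunter_obs[i:]), built over reversed(hs) then reversed
def pvTails (hs : List (List Int)) : List (List Int) :=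
  (hs.reverse.foldl (fun acc h => acc ++ [h ++ acc.getLastD []]) [[]]).reverse

def aggregate_obs_alt (hunter_obs : List (List Int)) (prey_obs : List Int) : List (List Int) :=
  let prefixes := pvPrefixes hunter_obs
  let tails := pvTails hunter_obs
  (PySem.List.enumerate hunter_obs 0).map (fun p =>
    p.2 ++ PySem.List.pyGetD prefixes p.1 [] ++ PySem.List.pyGetD tails (p.1 + 1) [] ++ prey_obs)

-- ===== PRECONDITION & SPEC =====
def Spec_aggregate_obs (hunter_obs : List (List Int)) (prey_obs : List Int) (out : List (List Int)) : Prop := out = aggregate_obs_alt hunter_obs prey_obs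
instance (hunter_obs : List (List Int)) (prey_obs : List Int) (out : List (List Int)) : Decidable (Spec_aggregate_obs hunter_obs prey_obs out) := by unfold Spec_aggregate_obs; infer_instance

-- ===== CLAIM (what is proved, stated in full; the proofs are below) =====
def Claim_equal_aggregate_obs : Prop := ∀ (hunter_obs : List (List Int)) (prey_obs : List Int), Dom_aggregate_obs hunter_obs prey_obs → Spec_aggregate_obs hunter_obs prey_obs (aggregate_obs hunter_obs prey_obs)

-- ===== LEMMAS AND PROOFS =====

-- common closed form both ports are reduced to
def pvSpec (hs : List (List Int)) (prey : List Int) : List (List Int) :=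
  (List.range hs.length).map (fun k =>
    hs.getD k [] ++ (hs.take k).flatten ++ (hs.drop (k + 1)).flatten ++ prey)

lemma aggregate_obs_eq_spec (hs : List (List Int)) (prey : List Int) :
    aggregate_obs hs prey = pvSpec hs prey := by
  unfold aggregate_obs pvSpec
  rw [PySem.List.pyRange_zero_nat, List.foldl_map, PySem.List.foldl_append_singleton_eq_map,
    List.nil_append]
  refine List.map_congr_left (fun k hk => ?_)
  simp only [PySem.List.pyGetD_natCast, PySem.List.foldl_append_eq_flatten,
    PySem.List.slice_to_natCast, ← Nat.cast_add_one, PySem.List.slice_from_natCast,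
    List.append_assoc]

lemma pvPrefixes_gen (hs : List (List Int)) :
    ∀ (acc : List (List Int)) (b : List Int),
      hs.foldl (fun acc h => acc ++ [acc.getLastD [] ++ h]) (acc ++ [b])
        = acc ++ (List.range (hs.length + 1)).map (fun i => b ++ (hs.take i).flatten) := by
  induction hs with
  | nil => intro acc b; simp
  | cons h t ih =>
    intro acc b
    simp only [List.foldl_cons, List.getLastD_concat, List.append_assoc, List.singleton_append]
    rw [show acc ++ [b, b ++ h] = (acc ++ [b]) ++ [b ++ h] by simp,
      ih (acc ++ [b]) (b ++ h)]
    simp [List.range_succ_eq_map, List.map_map, Function.comp]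

lemma pvPrefixes_eq (hs : List (List Int)) :
    pvPrefixes hs = (List.range (hs.length + 1)).map (fun i => (hs.take i).flatten) := by
  have := pvPrefixes_gen hs [] []
  simpa [pvPrefixes] using this

lemma pvTails_gen (l : List (List Int)) :
    ∀ (acc : List (List Int)) (b : List Int),
      l.foldl (fun acc h => acc ++ [h ++ acc.getLastD []]) (acc ++ [b])
        = acc ++ (List.range (l.length + 1)).map (fun i => (l.take i).reverse.flatten ++ b) := by
  induction l with
  | nil => intro acc b; simp
  | cons h t ih =>
    intro acc b
    simp only [List.foldl_cons, List.getLastD_concat, List.append_assoc, List.singleton_append]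
    rw [show acc ++ [b, h ++ b] = (acc ++ [b]) ++ [h ++ b] by simp,
      ih (acc ++ [b]) (h ++ b)]
    simp [List.range_succ_eq_map, List.map_map, Function.comp, List.append_assoc]

lemma pvTails_eq (hs : List (List Int)) :
    pvTails hs = (List.range (hs.length + 1)).map (fun i => (hs.drop i).flatten) := by
  have h1 := pvTails_gen hs.reverse [] []
  simp only [List.nil_append, List.append_nil, List.length_reverse] at h1
  unfold pvTails
  rw [h1]
  apply List.ext_getElem
  · simp
  · intro k hk1 hk2
    simp only [List.length_reverse, List.length_map, List.length_range] at hk1 hk2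
    rw [List.getElem_reverse]
    simp only [List.length_map, List.length_range, List.getElem_map, List.getElem_range]
    rw [List.take_reverse, show hs.length - (hs.length + 1 - 1 - k) = k from by omega]
    simp

lemma aggregate_obs_alt_eq_spec (hs : List (List Int)) (prey : List Int) :
    aggregate_obs_alt hs prey = pvSpec hs prey := by
  unfold aggregate_obs_alt pvSpec
  rw [pvPrefixes_eq, pvTails_eq]
  apply List.ext_getElem
  · simp [PySem.List.length_enumerate]
  · intro k hk1 hk2
    simp only [List.length_map, PySem.List.length_enumerate] at hk1
    simp only [List.length_map, List.length_range] at hk2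
    rw [List.getElem_map, List.getElem_map, PySem.List.getElem_enumerate, List.getElem_range]
    simp only [Int.zero_add, ← Nat.cast_add_one, PySem.List.pyGetD_natCast]
    rw [List.getD_eq_getElem _ _ (by simp; omega), List.getD_eq_getElem _ _ (by simp; omega),
      List.getD_eq_getElem _ _ hk1]
    simp

-- ===== VERDICT (by name: the statement is the Claim_ definition above) =====
theorem aggregate_obs_spec : Claim_equal_aggregate_obs := by
  intro hs prey _
  unfold Spec_aggregate_obs
  rw [aggregate_obs_eq_spec, aggregate_obs_alt_eq_spec]
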